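-- pv_equiv track=rewrite | github.com/Smrt666/Vislice | src/analysis/utils.py | one_letter_away_words
-- ===== SOURCE A (Python) =====
-- def one_letter_away_words(word: str, word_list: list[str], checked_shapes: set[tuple[int, str]]) -> list[list[str]]:
--     groups = []
--     for i in range(len(word)):
--         shape = word[:i] + word[i + 1 :]
--         if (i, shape) in checked_shapes:
--             continue
--         checked_shapes.add((i, shape))
--         groups.append([w for w in word_list if shape == w[:i] + w[i + 1 :] and w[i] not in shape])
--     return groups
-- ===== SOURCE B (Python) =====
-- def one_letter_away_words(word: str, word_list: list[str], checked_shapes: set[tuple[int, str]]) -> list[list[str]]: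
--     # One pass over word_list tags each word with its single diff position vs word
--     # (and whether its changed letter occurs elsewhere in it); groups are then built
--     # by cheap tag comparisons instead of per-(position, word) string surgery.
--     n = len(word)
--     ann = []
--     for w in word_list:
--         d, ok = -2, False
--         if len(w) == n:
--             diffs = [j for j in range(n) if w[j] != word[j]]
--             if not diffs:
--                 d = -1
--             elif len(diffs) == 1:
--                 d = diffs[0]
--                 ok = w[d] not in w[:d] + w[d + 1:]
--         ann.append((w, d, ok))
--     kept = [(i, word[:i] + word[i + 1:]) for i in range(n)]
--     kept = [t for t in kept if t not in checked_shapes]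
--     checked_shapes.update(kept)
--     return [[w for (w, d, ok) in ann if (d == i and ok) or (d == -1 and word[i] not in s)]
--             for (i, s) in kept]
-- ===== Notes on version B (the rewrite author's own statement) =====
-- stated objective: faster
-- what changed: Instead of re-erasing every word at every position of `word` (an O(L)-work string comparison per (position, word) pair), B makes one pass over word_list that tags each word with its unique diff position vs `word` (or a no-diff/multi-diff marker) plus a precomputed ok-flag, and then forms each group by constant-time tag comparisons.
-- crash fix: When word is nonempty, word[:-1] occurs in word_list and (len(word)-1, word[:-1]) is not already in checked_shapes, A raises IndexError (w[i] with i == len(w)); B returns the groups of the remaining words. — e.g. on one_letter_away_words("ab", ["a", "cb"], []): A raises IndexError, B returns [["cb"], []]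
import Mathlib
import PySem

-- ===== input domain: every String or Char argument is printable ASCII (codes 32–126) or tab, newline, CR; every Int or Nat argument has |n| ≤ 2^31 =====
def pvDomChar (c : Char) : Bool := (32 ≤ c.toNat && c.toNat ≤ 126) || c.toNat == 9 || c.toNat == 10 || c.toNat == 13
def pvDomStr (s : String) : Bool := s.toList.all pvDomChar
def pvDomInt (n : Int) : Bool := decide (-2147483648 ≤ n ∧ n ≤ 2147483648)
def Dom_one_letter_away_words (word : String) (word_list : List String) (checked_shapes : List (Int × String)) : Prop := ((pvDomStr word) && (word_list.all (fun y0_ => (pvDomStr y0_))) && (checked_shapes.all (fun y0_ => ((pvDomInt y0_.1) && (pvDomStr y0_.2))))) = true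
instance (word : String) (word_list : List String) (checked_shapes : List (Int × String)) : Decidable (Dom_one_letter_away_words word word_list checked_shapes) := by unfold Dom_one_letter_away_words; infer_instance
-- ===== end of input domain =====

-- B replaces A's per-position rescan (re-erasing every word at every position) by one pass that
-- tags each word with its single diff position vs `word`, then builds groups by tag comparison
-- (objective: faster). Both Pythons mutate `checked_shapes` identically (same keys added, same
-- order); the equivalence proved here is about the return value.

-- ===== PORT A =====
def one_letter_away_words (word : String) (word_list : List String) (checked_shapes : List (Int × String)) : List (List String) :=
  ((PySem.List.pyRange 0 (word.toList.length : Int) 1).foldl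
    (fun (st : List (Int × String) × List (List String)) i =>
      let shapeL : List Char :=
        PySem.List.slice word.toList none (some i) ++ PySem.List.slice word.toList (some (i + 1)) none
      let shape : String := String.ofList shapeL
      if PySem.Set.contains st.1 (i, shape) then st
      else
        (PySem.Set.add st.1 (i, shape),
         st.2 ++ [word_list.filter (fun w =>
            decide ((PySem.List.slice w.toList none (some i) ++ PySem.List.slice w.toList (some (i + 1)) none) = shapeL) &&
            (match PySem.List.pyGet? w.toList i with   -- none = IndexError in Python; outside Pre_
             | some c => !(shapeL.contains c)
             | none => false))]))
    (checked_shapes, [])).2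

-- ===== PORT B =====
def one_letter_away_words_alt (word : String) (word_list : List String) (checked_shapes : List (Int × String)) : List (List String) :=
  let n : Int := (word.toList.length : Int)
  let ann : List (String × Int × Bool) := word_list.map (fun w =>
    let db : Int × Bool :=
      if (w.toList.length : Int) = n then
        match (PySem.List.pyRange 0 n 1).filter
            (fun j => !(PySem.List.pyGet? w.toList j == PySem.List.pyGet? word.toList j)) with
        | [] => (-1, false)
        | [d] => (d, match PySem.List.pyGet? w.toList d with
                     | some c => !((PySem.List.slice w.toList none (some d) ++ PySem.List.slice w.toList (some (d + 1)) none).contains c)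
                     | none => false)
        | _ => (-2, false)
      else (-2, false)
    (w, db))
  let kept : List (Int × String) := (PySem.List.pyRange 0 n 1).map (fun i =>
    (i, String.ofList (PySem.List.slice word.toList none (some i) ++ PySem.List.slice word.toList (some (i + 1)) none)))
  let kept := kept.filter (fun t => !(PySem.Set.contains checked_shapes t))
  kept.map (fun t =>
    (ann.filter (fun p => (p.2.1 == t.1 && p.2.2) ||
        (p.2.1 == -1 &&
          (match PySem.List.pyGet? word.toList t.1 with
           | some c => !(t.2.toList.contains c)
           | none => false)))).map (·.1))

-- ===== PRECONDITION & SPEC =====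
-- Python A raises IndexError exactly when word is nonempty, word[:-1] occurs in word_list and the
-- key (len(word)-1, word[:-1]) is not already in checked_shapes (then `w[i]` is evaluated at
-- i = len(w)); Pre_ excludes exactly those inputs.
def Pre_one_letter_away_words (word : String) (word_list : List String) (checked_shapes : List (Int × String)) : Prop :=
  ¬ (word ≠ "" ∧ String.ofList word.toList.dropLast ∈ word_list ∧
      ((word.toList.length : Int) - 1, String.ofList word.toList.dropLast) ∉ checked_shapes)
instance (word : String) (word_list : List String) (checked_shapes : List (Int × String)) : Decidable (Pre_one_letter_away_words word word_list checked_shapes) := by unfold Pre_one_letter_away_words; infer_instance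

def pvWitness_one_letter_away_words : String × List String × (List (Int × String)) :=
  ("ab", ["aa", "bb", "cb"], [])

-- On these inputs Python A raises IndexError (w[i] with i = len(w)) while B returns the groups of
-- the remaining, well-formed words.
def Raises_one_letter_away_words (word : String) (word_list : List String) (checked_shapes : List (Int × String)) : Prop :=
  word ≠ "" ∧ String.ofList word.toList.dropLast ∈ word_list ∧
    ((word.toList.length : Int) - 1, String.ofList word.toList.dropLast) ∉ checked_shapes
instance (word : String) (word_list : List String) (checked_shapes : List (Int × String)) : Decidable (Raises_one_letter_away_words word word_list checked_shapes) := by unfold Raises_one_letter_away_words; infer_instance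

def pvRaiseWitness_one_letter_away_words : String × List String × (List (Int × String)) :=
  ("ab", ["a", "cb"], [])
def pvRaiseWitnessOut_one_letter_away_words : List (List String) := [["cb"], []]

def Spec_one_letter_away_words (word : String) (word_list : List String) (checked_shapes : List (Int × String)) (out : List (List String)) : Prop := out = one_letter_away_words_alt word word_list checked_shapes
instance (word : String) (word_list : List String) (checked_shapes : List (Int × String)) (out : List (List String)) : Decidable (Spec_one_letter_away_words word word_list checked_shapes out) := by unfold Spec_one_letter_away_words; infer_instance

-- ===== CLAIM (what is proved, stated in full; the proofs are below) =====
def Claim_equal_one_letter_away_words : Prop := ∀ (word : String) (word_list : List String) (checked_shapes : List (Int × String)), Dom_one_letter_away_words word word_list checked_shapes → Pre_one_letter_away_words word word_list checked_shapes → Spec_one_letter_away_words word word_list checked_shapes (one_letter_away_words word word_list checked_shapes)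
def Claim_raises_one_letter_away_words : Prop := (∀ (word : String) (word_list : List String) (checked_shapes : List (Int × String)), Dom_one_letter_away_words word word_list checked_shapes → Raises_one_letter_away_words word word_list checked_shapes → ¬ Pre_one_letter_away_words word word_list checked_shapes) ∧ (Dom_one_letter_away_words (pvRaiseWitness_one_letter_away_words.1) (pvRaiseWitness_one_letter_away_words.2.1) (pvRaiseWitness_one_letter_away_words.2.2) ∧ Raises_one_letter_away_words (pvRaiseWitness_one_letter_away_words.1) (pvRaiseWitness_one_letter_away_words.2.1) (pvRaiseWitness_one_letter_away_words.2.2) ∧ one_letter_away_words_alt (pvRaiseWitness_one_letter_away_words.1) (pvRaiseWitness_one_letter_away_words.2.1) (pvRaiseWitness_one_letter_away_words.2.2) = pvRaiseWitnessOut_one_letter_away_words)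

-- ===== LEMMAS AND PROOFS =====

-- `word` with the letter at (Int) position i removed, as both ports compute it
def pvEr (L : List Char) (i : Int) : List Char :=
  PySem.List.slice L none (some i) ++ PySem.List.slice L (some (i + 1)) none

-- `L[i] not in S` with A's none-branch (Python would raise there)
def pvNotIn (L : List Char) (i : Int) (S : List Char) : Bool :=
  match PySem.List.pyGet? L i with
  | some c => !(S.contains c)
  | none => false

-- A's filter predicate at group position i
def pvPA (W : List Char) (i : Int) (X : List Char) : Bool :=
  decide (pvEr X i = pvEr W i) && pvNotIn X i (pvEr W i)

-- B's annotation (diff tag, ok flag) of a word X against W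
def pvTag (W X : List Char) : Int × Bool :=
  if (X.length : Int) = (W.length : Int) then
    match (PySem.List.pyRange 0 (W.length : Int) 1).filter
        (fun j => !(PySem.List.pyGet? X j == PySem.List.pyGet? W j)) with
    | [] => (-1, false)
    | [d] => (d, pvNotIn X d (pvEr X d))
    | _ => (-2, false)
  else (-2, false)

-- B's group-membership test from the tag
def pvQ (i : Int) (selfok : Bool) (t : Int × Bool) : Bool :=
  (t.1 == i && t.2) || (t.1 == -1 && selfok)

-- the common skip-or-append loop of both ports, with the group computation abstracted as g
def pvLoop (sh : Int → String) (g : Int → List String) : Nat → Int → List (Int × String) → List (List String)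
  | 0, _, _ => []
  | n + 1, a, cs =>
    if PySem.Set.contains cs (a, sh a) then pvLoop sh g n (a + 1) cs
    else g a :: pvLoop sh g n (a + 1) (PySem.Set.add cs (a, sh a))

theorem pvLoop_fold (sh : Int → String) (g : Int → List String) :
    ∀ (n : Nat) (a : Int) (cs : List (Int × String)) (acc : List (List String)),
      ((PySem.List.pyRange a (a + (n : Int)) 1).foldl
        (fun (st : List (Int × String) × List (List String)) i =>
          if PySem.Set.contains st.1 (i, sh i) then st
          else (PySem.Set.add st.1 (i, sh i), st.2 ++ [g i])) (cs, acc)).2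
      = acc ++ pvLoop sh g n a cs := by
  intro n
  induction n with
  | zero =>
    intro a cs acc
    rw [show a + ((0 : Nat) : Int) = a by simp, PySem.List.pyRange_one_eq_nil le_rfl]
    simp [pvLoop]
  | succ n ih =>
    intro a cs acc
    rw [PySem.List.pyRange_one_cons (by omega : a < a + ((n + 1 : Nat) : Int))]
    rw [List.foldl_cons]
    rw [show (a + ((n + 1 : Nat) : Int)) = (a + 1) + ((n : Nat) : Int) by push_cast; ring]
    by_cases h : PySem.Set.contains cs (a, sh a)
    · rw [if_pos h, ih (a + 1) cs acc]
      conv_rhs => rw [pvLoop]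
      rw [if_pos h]
    · rw [if_neg h, ih (a + 1) (PySem.Set.add cs (a, sh a)) (acc ++ [g a])]
      conv_rhs => rw [pvLoop]
      rw [if_neg h, List.append_assoc]
      rfl

theorem pvLoop_congr (sh : Int → String) (g1 g2 : Int → List String) :
    ∀ (n : Nat) (a : Int) (cs : List (Int × String)),
      (∀ i : Int, a ≤ i → i < a + (n : Int) → g1 i = g2 i) →
      pvLoop sh g1 n a cs = pvLoop sh g2 n a cs := by
  intro n
  induction n with
  | zero => intro a cs _; rfl
  | succ n ih =>
    intro a cs h
    simp only [pvLoop]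
    have ha : g1 a = g2 a := h a le_rfl (by push_cast; omega)
    have ht : ∀ i : Int, a + 1 ≤ i → i < (a + 1) + (n : Int) → g1 i = g2 i := by
      intro i h1 h2; exact h i (by omega) (by push_cast; omega)
    by_cases hc : PySem.Set.contains cs (a, sh a)
    · rw [if_pos hc, if_pos hc, ih (a + 1) cs ht]
    · rw [if_neg hc, if_neg hc, ha, ih (a + 1) (PySem.Set.add cs (a, sh a)) ht]

-- pvEr at a natural index is eraseIdx
theorem pvEr_natCast (L : List Char) (k : Nat) : pvEr L (k : Int) = L.eraseIdx k := by
  unfold pvEr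
  rw [show ((k : Int) + 1) = ((k + 1 : Nat) : Int) by push_cast; ring]
  rw [PySem.List.slice_to_natCast, PySem.List.slice_from_natCast, List.eraseIdx_eq_take_drop_succ]

-- equal one-position erasures = agreement off that position (same lengths)
theorem eraseIdx_eq_iff_agree (X W : List Char) (k : Nat) (hlen : X.length = W.length)
    (hk : k < W.length) :
    X.eraseIdx k = W.eraseIdx k ↔ (∀ j : Nat, j < W.length → j ≠ k → X[j]? = W[j]?) := by
  constructor
  · intro h j hj hjk
    have hjX : j < X.length := by omega
    have hlenE : (X.eraseIdx k).length = W.length - 1 := by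
      rw [List.length_eraseIdx]; simp [hlen]; omega
    rcases Nat.lt_or_ge j k with hlt | hge
    · have hj' : j < (X.eraseIdx k).length := by omega
      have h1 : (X.eraseIdx k)[j] = X[j] := by rw [List.getElem_eraseIdx]; simp [hlt]
      have hj'' : j < (W.eraseIdx k).length := by rw [h] at hj'; exact hj'
      have h2 : (W.eraseIdx k)[j] = W[j] := by rw [List.getElem_eraseIdx]; simp [hlt]
      rw [List.getElem?_eq_getElem hjX, List.getElem?_eq_getElem hj, ← h1, ← h2]
      congr 1
      exact List.getElem_of_eq h hj'
    · have hgt : k < j := by omega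
      have hj1 : j - 1 < (X.eraseIdx k).length := by omega
      have hnl : ¬ (j - 1 < k) := by omega
      have h1 : (X.eraseIdx k)[j - 1] = X[j - 1 + 1] := by
        rw [List.getElem_eraseIdx]; simp [hnl]
      have hj2 : j - 1 < (W.eraseIdx k).length := by rw [h] at hj1; exact hj1
      have h2 : (W.eraseIdx k)[j - 1] = W[j - 1 + 1] := by
        rw [List.getElem_eraseIdx]; simp [hnl]
      have hje : j - 1 + 1 = j := by omega
      rw [List.getElem?_eq_getElem hjX, List.getElem?_eq_getElem hj]
      have h3 : (X.eraseIdx k)[j - 1] = (W.eraseIdx k)[j - 1] := List.getElem_of_eq h hj1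
      rw [h1, h2] at h3
      simp only [hje] at h3
      rw [h3]
  · intro h
    apply List.ext_getElem?
    intro j
    rcases Nat.lt_or_ge j (W.length - 1) with hj | hj
    · have hjX : j < (X.eraseIdx k).length := by
        rw [List.length_eraseIdx, if_pos (show k < X.length by omega)]; omega
      have hjW : j < (W.eraseIdx k).length := by
        rw [List.length_eraseIdx, if_pos hk]; omega
      rw [List.getElem?_eq_getElem hjX, List.getElem?_eq_getElem hjW]
      rcases Nat.lt_or_ge j k with hlt | hge
      · have h1 : (X.eraseIdx k)[j] = X[j] := by rw [List.getElem_eraseIdx]; simp [hlt]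
        have h2 : (W.eraseIdx k)[j] = W[j] := by rw [List.getElem_eraseIdx]; simp [hlt]
        rw [h1, h2]
        have := h j (by omega) (by omega)
        rw [List.getElem?_eq_getElem (by omega : j < X.length), List.getElem?_eq_getElem (by omega : j < W.length)] at this
        exact congrArg _ (Option.some.inj this)
      · have hnl : ¬ (j < k) := by omega
        have h1 : (X.eraseIdx k)[j] = X[j + 1] := by rw [List.getElem_eraseIdx]; simp [hnl]
        have h2 : (W.eraseIdx k)[j] = W[j + 1] := by rw [List.getElem_eraseIdx]; simp [hnl]
        rw [h1, h2]
        have := h (j + 1) (by omega) (by omega)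
        rw [List.getElem?_eq_getElem (by omega : j + 1 < X.length), List.getElem?_eq_getElem (by omega : j + 1 < W.length)] at this
        exact congrArg _ (Option.some.inj this)
    · have hjX : ¬ j < (X.eraseIdx k).length := by
        rw [List.length_eraseIdx, if_pos (show k < X.length by omega)]; omega
      have hjW : ¬ j < (W.eraseIdx k).length := by
        rw [List.length_eraseIdx, if_pos hk]; omega
      rw [List.getElem?_eq_none (by omega), List.getElem?_eq_none (by omega)]

-- the core pointwise fact: A's predicate equals B's tag test, at every group position
theorem core_eq (W X : List Char) (k : Nat) (hk : k < W.length) :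
    pvPA W (k : Int) X = pvQ (k : Int) (pvNotIn W (k : Int) (pvEr W (k : Int))) (pvTag W X) := by
  by_cases hlen : X.length = W.length
  · -- same length: compare via the diff list
    have hrange : (PySem.List.pyRange 0 (W.length : Int) 1).filter
        (fun j => !(PySem.List.pyGet? X j == PySem.List.pyGet? W j))
        = List.map (fun j : Nat => (j : Int)) ((List.range W.length).filter (fun j : Nat => !(X[j]? == W[j]?))) := by
      rw [PySem.List.pyRange_zero_nat, List.filter_map]
      exact congrArg (List.map (fun j : Nat => (j : Int)))
        (List.filter_congr (fun j _ => by simp [Function.comp, PySem.List.pyGet?_natCast]))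
    have hmemD : ∀ j : Nat, j ∈ (List.range W.length).filter (fun j : Nat => !(X[j]? == W[j]?)) ↔
        (j < W.length ∧ X[j]? ≠ W[j]?) := by
      intro j
      rw [List.mem_filter, List.mem_range]
      simp
    rcases hD : (List.range W.length).filter (fun j : Nat => !(X[j]? == W[j]?)) with _ | ⟨d, _ | ⟨d2, rest⟩⟩
    · -- no diffs: X = W
      have hXW : X = W := by
        apply List.ext_getElem? (fun j => ?_)
        rcases Nat.lt_or_ge j W.length with hj | hj
        · by_contra hne
          have : j ∈ (List.range W.length).filter (fun j : Nat => !(X[j]? == W[j]?)) := (hmemD j).2 ⟨hj, hne⟩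
          rw [hD] at this; exact absurd this (List.not_mem_nil)
        · rw [List.getElem?_eq_none (by omega), List.getElem?_eq_none (by omega)]
      unfold pvTag
      rw [if_pos (by exact_mod_cast hlen), hrange, hD]
      subst hXW
      simp [pvPA, pvQ]
    · -- exactly one diff d
      have hd := (hmemD d).1 (by rw [hD]; exact List.mem_cons_self)
      have hagree : ∀ j : Nat, j < W.length → j ≠ d → X[j]? = W[j]? := by
        intro j hj hjd
        by_contra hne
        have : j ∈ (List.range W.length).filter (fun j : Nat => !(X[j]? == W[j]?)) := (hmemD j).2 ⟨hj, hne⟩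
        rw [hD] at this
        simp at this
        exact hjd this
      unfold pvTag
      rw [if_pos (by exact_mod_cast hlen), hrange, hD]
      by_cases hdk : d = k
      · -- diff exactly at the tested position: both sides test the changed letter
        subst hdk
        have her : X.eraseIdx d = W.eraseIdx d :=
          (eraseIdx_eq_iff_agree X W d hlen hk).2 (fun j hj hjd => hagree j hj hjd)
        have herL : pvEr X (d : Int) = pvEr W (d : Int) := by
          rw [pvEr_natCast, pvEr_natCast, her]
        have hne1 : (((d : Nat) : Int) == (-1 : Int)) = false := by simp
        simp only [List.map_cons, List.map_nil, pvPA, pvQ, herL, hne1]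
        simp
      · -- diff elsewhere: the erased words differ, neither side accepts
        have hne : pvEr X (k : Int) ≠ pvEr W (k : Int) := by
          rw [pvEr_natCast, pvEr_natCast]
          intro h
          have := (eraseIdx_eq_iff_agree X W k hlen hk).1 h d hd.1 hdk
          exact hd.2 this
        have h1 : (((d : Nat) : Int) == ((k : Nat) : Int)) = false := by
          simp [hdk]
        have h2 : (((d : Nat) : Int) == (-1 : Int)) = false := by
          simp
        simp only [List.map_cons, List.map_nil, pvPA, pvQ]
        rw [decide_eq_false hne]
        simp [h1, h2]
    · -- at least two diffs: some diff is off k, neither side accepts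
      have hd := (hmemD d).1 (by rw [hD]; exact List.mem_cons_self)
      have hd2 := (hmemD d2).1 (by rw [hD]; exact List.mem_cons_of_mem _ (List.mem_cons_self))
      have hnd : d ≠ d2 := by
        have hnodup : ((List.range W.length).filter (fun j : Nat => !(X[j]? == W[j]?))).Nodup :=
          List.Nodup.filter _ (List.nodup_range)
        rw [hD] at hnodup
        intro h; subst h
        exact (List.nodup_cons.1 hnodup).1 List.mem_cons_self
      obtain ⟨e, he⟩ : ∃ e : Nat, e < W.length ∧ X[e]? ≠ W[e]? ∧ e ≠ k := by
        by_cases h : d = k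
        · exact ⟨d2, hd2.1, hd2.2, by omega⟩
        · exact ⟨d, hd.1, hd.2, h⟩
      have hne : pvEr X (k : Int) ≠ pvEr W (k : Int) := by
        rw [pvEr_natCast, pvEr_natCast]
        intro h
        exact he.2.1 ((eraseIdx_eq_iff_agree X W k hlen hk).1 h e he.1 he.2.2)
      unfold pvTag
      rw [if_pos (by exact_mod_cast hlen), hrange, hD]
      simp only [List.map_cons, pvPA, pvQ]
      rw [decide_eq_false hne]
      simp
  · -- different lengths: B's tag is (-2, false); A's test is false too
    have htag : pvTag W X = ((-2 : Int), false) := by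
      unfold pvTag
      rw [if_neg (by exact_mod_cast hlen)]
    rw [htag]
    have hq : pvQ (k : Int) (pvNotIn W (k : Int) (pvEr W (k : Int))) ((-2 : Int), false) = false := by
      simp only [pvQ]
      have h1 : ((-2 : Int) == ((k : Nat) : Int)) = false := by simp
      simp [h1]
    rw [hq]
    -- A: either the two erasures have different lengths, or X = W.eraseIdx k and X[k] is none
    unfold pvPA
    by_cases heq : pvEr X (k : Int) = pvEr W (k : Int)
    · have hlenX : X.length ≤ k := by
        have hl := congrArg List.length heq
        rw [pvEr_natCast, pvEr_natCast, List.length_eraseIdx, List.length_eraseIdx, if_pos hk] at hl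
        by_cases hkX : k < X.length
        · rw [if_pos hkX] at hl; omega
        · omega
      have hnone : PySem.List.pyGet? X ((k : Nat) : Int) = none := by
        rw [PySem.List.pyGet?_natCast]
        exact List.getElem?_eq_none (by omega)
      rw [decide_eq_true heq]
      simp [pvNotIn, hnone]
    · rw [decide_eq_false heq]
      simp

-- pushing B's annotate-then-filter through the map: it is A's direct filter, pointwise
theorem filter_map_fst {α : Type} (f : String → String × α) (q : String × α → Bool) (p : String → Bool)
    (h1 : ∀ w, (f w).1 = w) (h2 : ∀ w, q (f w) = p w) :
    ∀ l : List String, ((l.map f).filter q).map (·.1) = l.filter p := by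
  intro l
  induction l with
  | nil => rfl
  | cons a l ih =>
    rw [List.map_cons, List.filter_cons, List.filter_cons, h2 a]
    by_cases hp : p a
    · rw [hp]; simp only [if_pos]; rw [List.map_cons, h1 a, ih]
    · simp only [hp, Bool.false_eq_true, if_neg, not_false_iff]; rw [ih]

-- the two group computations agree at every position of word
theorem group_eq (word : String) (word_list : List String) (k : Nat) (hk : k < word.toList.length) :
    word_list.filter (fun w => pvPA word.toList (k : Int) w.toList) =
      ((word_list.map (fun w => (w, pvTag word.toList w.toList))).filter
          (fun t => pvQ (k : Int) (pvNotIn word.toList (k : Int) (pvEr word.toList (k : Int))) t.2)).map (·.1) := by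
  rw [filter_map_fst (fun w => (w, pvTag word.toList w.toList))
      (fun t => pvQ (k : Int) (pvNotIn word.toList (k : Int) (pvEr word.toList (k : Int))) t.2)
      (fun w => pvPA word.toList (k : Int) w.toList) (fun _ => rfl)
      (fun w => (core_eq word.toList w.toList k hk).symm)]

-- both ports are instances of pvLoop with their group functions
theorem portA_eq (word : String) (word_list : List String) (cs : List (Int × String)) :
    one_letter_away_words word word_list cs =
      pvLoop (fun i => String.ofList (pvEr word.toList i))
        (fun i => word_list.filter (fun w => pvPA word.toList i w.toList)) word.toList.length 0 cs := by
  have h := pvLoop_fold (fun i => String.ofList (pvEr word.toList i))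
      (fun i => word_list.filter (fun w => pvPA word.toList i w.toList)) word.toList.length 0 cs []
  rw [zero_add, List.nil_append] at h
  exact h

theorem contains_add_ne (s : List (Int × String)) (x y : Int × String) (h : y ≠ x) :
    PySem.Set.contains (PySem.Set.add s x) y = PySem.Set.contains s y := by
  by_cases hy : y ∈ s
  · rw [(PySem.Set.contains_iff _ _).2 ((PySem.Set.mem_add s x y).2 (Or.inl hy)),
      (PySem.Set.contains_iff _ _).2 hy]
  · have h1 : ¬ y ∈ PySem.Set.add s x := fun hm => ((PySem.Set.mem_add s x y).1 hm).elim hy h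
    rw [Bool.eq_iff_iff]
    constructor
    · intro hc; exact absurd ((PySem.Set.contains_iff _ _).1 hc) h1
    · intro hc; exact absurd ((PySem.Set.contains_iff _ _).1 hc) hy

-- pvLoop is the keep-list formulation B uses: filter the (position, shape) pairs first
theorem pvLoop_eq_filter (sh : Int → String) (g : Int → List String) :
    ∀ (n : Nat) (a : Int) (cs : List (Int × String)),
      pvLoop sh g n a cs =
        (((PySem.List.pyRange a (a + (n : Int)) 1).map (fun i => (i, sh i))).filter
          (fun t => !(PySem.Set.contains cs t))).map (fun t => g t.1) := by
  intro n
  induction n with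
  | zero =>
    intro a cs
    rw [show a + ((0 : Nat) : Int) = a by simp, PySem.List.pyRange_one_eq_nil le_rfl]
    rfl
  | succ n ih =>
    intro a cs
    rw [PySem.List.pyRange_one_cons (by omega : a < a + ((n + 1 : Nat) : Int)),
      show (a + ((n + 1 : Nat) : Int)) = (a + 1) + ((n : Nat) : Int) by push_cast; ring,
      List.map_cons, List.filter_cons]
    by_cases h : PySem.Set.contains cs (a, sh a)
    · rw [show pvLoop sh g (n + 1) a cs = pvLoop sh g n (a + 1) cs from by rw [pvLoop, if_pos h]]
      have hmem : (a, sh a) ∈ cs := (PySem.Set.contains_iff cs (a, sh a)).1 h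
      rw [ih (a + 1) cs]
      simp [hmem]
    · rw [show pvLoop sh g (n + 1) a cs
          = g a :: pvLoop sh g n (a + 1) (PySem.Set.add cs (a, sh a)) from by rw [pvLoop, if_neg h]]
      rw [ih (a + 1) (PySem.Set.add cs (a, sh a))]
      have hfc : ((PySem.List.pyRange (a + 1) (a + 1 + (n : Int)) 1).map (fun i => (i, sh i))).filter
            (fun t => !(PySem.Set.contains (PySem.Set.add cs (a, sh a)) t))
          = ((PySem.List.pyRange (a + 1) (a + 1 + (n : Int)) 1).map (fun i => (i, sh i))).filter
            (fun t => !(PySem.Set.contains cs t)) := by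
        apply List.filter_congr
        intro t ht
        obtain ⟨i, hi, rfl⟩ := List.mem_map.1 ht
        have hia : i ≠ a := by
          have := (PySem.List.mem_pyRange_one).1 hi
          omega
        rw [contains_add_ne cs (a, sh a) (i, sh i) (fun hp => hia (congrArg Prod.fst hp))]
      have hmem : (a, sh a) ∉ cs := fun hm => h ((PySem.Set.contains_iff cs (a, sh a)).2 hm)
      rw [hfc]
      simp [hmem]

theorem portB_eq (word : String) (word_list : List String) (cs : List (Int × String)) :
    one_letter_away_words_alt word word_list cs =
      pvLoop (fun i => String.ofList (pvEr word.toList i))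
        (fun i => ((word_list.map (fun w => (w, pvTag word.toList w.toList))).filter
            (fun t => pvQ i (pvNotIn word.toList i (pvEr word.toList i)) t.2)).map (·.1))
        word.toList.length 0 cs := by
  rw [pvLoop_eq_filter, zero_add]
  show (((PySem.List.pyRange 0 (word.toList.length : Int) 1).map
      (fun i => (i, String.ofList (pvEr word.toList i)))).filter
      (fun t => !(PySem.Set.contains cs t))).map _ = _
  apply List.map_congr_left
  intro t ht
  obtain ⟨i, _, rfl⟩ := List.mem_map.1 (List.mem_of_mem_filter ht)
  apply congrArg _ (List.filter_congr (fun p _ => ?_))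
  show pvQ i (pvNotIn word.toList i
      ((String.ofList (pvEr word.toList i)).toList)) p.2
    = pvQ i (pvNotIn word.toList i (pvEr word.toList i)) p.2
  rw [String.toList_ofList]

theorem ports_eq (word : String) (word_list : List String) (cs : List (Int × String)) :
    one_letter_away_words word word_list cs = one_letter_away_words_alt word word_list cs := by
  rw [portA_eq, portB_eq]
  apply pvLoop_congr
  intro i h0 hn
  obtain ⟨k, rfl⟩ : ∃ k : Nat, i = (k : Int) := ⟨i.toNat, by omega⟩
  have hk : k < word.toList.length := by
    rw [zero_add] at hn; exact_mod_cast hn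
  exact group_eq word word_list k hk

-- ===== VERDICT (by name: the statement is the Claim_ definition above) =====
theorem one_letter_away_words_spec : Claim_equal_one_letter_away_words := by
  intro word word_list checked_shapes _ _
  unfold Spec_one_letter_away_words
  exact ports_eq word word_list checked_shapes

theorem one_letter_away_words_raises : Claim_raises_one_letter_away_words := by
  unfold Claim_raises_one_letter_away_words
  constructor
  · intro word word_list checked_shapes _ hr hp
    exact hp hr
  · exact ⟨by decide, by decide, by decide⟩

-- self-check: the raise witness's B-value really is the stated literal
theorem pvRaiseWitness_ok :
    one_letter_away_words_alt (pvRaiseWitness_one_letter_away_words.1)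
      (pvRaiseWitness_one_letter_away_words.2.1) (pvRaiseWitness_one_letter_away_words.2.2)
      = pvRaiseWitnessOut_one_letter_away_words :=
  one_letter_away_words_raises.2.2.2
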